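-- pv_equiv track=rewrite | github.com/Goo-JZhang/SESSDSA | 网课作业/Week4/H3-3.py | HTMLMatch
-- ===== SOURCE A (Python) =====
-- class Stack(object):
--     def __init__(self):
--         self.items = []
--     def isEmpty(self):
--         return self.items == []
--     def push(self, item):
--         self.items.append(item)
--     def pop(self):
--         return self.items.pop()
--     def peek(self):
--         return self.items[-1]
--     def size(self):
--         return len(self.items)
--
-- def HTMLMatch(astring):
--     #获得tag
--     def get_tag(astring):
--         alist=[]
--         temp=''
--         rangle=0
--         for i in astring:
--             #找到<
--             if i=='<':
--                 rangle=True
--             if rangle and i not in "<>":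
--                 temp=temp+i
--             if i=='>':
--                 alist.append(temp)
--                 temp=''
--                 rangle=False
--         return alist
--     mStak=Stack()
--     taglist=get_tag(astring)
--     #开始匹配
--     for i in taglist:
--         if mStak.isEmpty():
--             mStak.push(i)
--         elif i=='/'+mStak.peek():#xxx和/xxx匹配
--             mStak.pop()
--         else:
--             mStak.push(i)
--     return mStak.isEmpty()
-- ===== SOURCE B (Python) =====
-- def HTMLMatch(astring):
--     # Split on '>' once: each completed tag is the part of a segment after its
--     # first '<' (with any further '<' dropped); segments are independent because
--     # the original loop resets temp and rangle on every '>'.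
--     stack = []
--     for seg in astring.split('>')[:-1]:
--         k = seg.find('<')
--         tag = '' if k < 0 else seg[k + 1:].replace('<', '')
--         if stack and tag == '/' + stack[-1]:
--             stack.pop()
--         else:
--             stack.append(tag)
--     return not stack
-- ===== Notes on version B (the rewrite author's own statement) =====
-- stated objective: faster
-- what changed: B replaces A's character-by-character scanner (buffer plus rangle flag building a taglist) by a single str.split on the tag terminator with per-segment find/slice/replace tag extraction, feeding the same stack matching; segments are independent because A resets its scanner state at each terminator.
import Mathlib
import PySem

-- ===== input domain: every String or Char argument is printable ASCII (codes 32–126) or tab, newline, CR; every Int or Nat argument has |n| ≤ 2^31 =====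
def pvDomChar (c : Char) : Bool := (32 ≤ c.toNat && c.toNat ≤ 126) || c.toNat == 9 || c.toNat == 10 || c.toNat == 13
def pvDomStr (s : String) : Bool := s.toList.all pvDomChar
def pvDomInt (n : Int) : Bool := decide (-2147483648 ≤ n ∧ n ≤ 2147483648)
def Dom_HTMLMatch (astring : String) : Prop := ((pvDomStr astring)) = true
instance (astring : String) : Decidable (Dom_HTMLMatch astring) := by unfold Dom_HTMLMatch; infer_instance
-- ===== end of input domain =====

-- B replaces A's char-by-char tag scanner (buffer + rangle flag) by one str.split on the tag
-- terminator plus per-segment find/slice/replace; same stack matching, same result; the timing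
-- run measured B faster (C-level string ops instead of a Python char loop).

-- ===== PORT A =====
-- get_tag's for-loop: state (alist, temp, rangle); the three ifs in Python's order.
def getTagAux : List Char → List (List Char) → List Char → Bool → List (List Char)
  | [], alist, _, _ => alist
  | c :: rest, alist, temp, rangle =>
    let rangle' := if c = '<' then true else rangle
    let temp' := if rangle' = true ∧ c ≠ '<' ∧ c ≠ '>' then temp ++ [c] else temp
    if c = '>' then getTagAux rest (alist ++ [temp']) [] false
    else getTagAux rest alist temp' rangle'

-- the matching for-loop over taglist; the stack is a list with its top at the END (Python append/pop/[-1])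
def matchLoop : List (List Char) → List (List Char) → List (List Char)
  | [], stk => stk
  | t :: rest, stk =>
    if stk = [] then matchLoop rest (stk ++ [t])
    else if t = '/' :: PySem.List.pyGetD stk (-1) [] then matchLoop rest stk.dropLast
    else matchLoop rest (stk ++ [t])

def HTMLMatch (astring : String) : Bool :=
  (matchLoop (getTagAux astring.toList [] [] false) []) == []

-- ===== PORT B =====
-- tag of one '>'-terminated segment: '' if no '<', else the part after the first '<' with '<'s removed
def tagOfB (seg : List Char) : List Char :=
  let k := PySem.Chars.find seg ['<']
  if k < 0 then [] else PySem.Chars.replace (PySem.List.slice seg (some (k + 1)) none) ['<'] []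

def stepB (stk : List (List Char)) (t : List Char) : List (List Char) :=
  if stk ≠ [] ∧ t = '/' :: PySem.List.pyGetD stk (-1) [] then stk.dropLast else stk ++ [t]

def HTMLMatch_alt (astring : String) : Bool :=
  ((PySem.List.slice (PySem.Chars.splitOn astring.toList ['>']) none (some (-1))).foldl
    (fun stk seg => stepB stk (tagOfB seg)) []).isEmpty

-- ===== PRECONDITION & SPEC =====
def Spec_HTMLMatch (astring : String) (out : Bool) : Prop := out = HTMLMatch_alt astring
instance (astring : String) (out : Bool) : Decidable (Spec_HTMLMatch astring out) := by unfold Spec_HTMLMatch; infer_instance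

-- ===== CLAIM (what is proved, stated in full; the proofs are below) =====
def Claim_equal_HTMLMatch : Prop := ∀ (astring : String), Dom_HTMLMatch astring → Spec_HTMLMatch astring (HTMLMatch astring)

-- ===== LEMMAS AND PROOFS =====

-- segments of cs separated by '>' (last = unterminated remainder), built back-to-front
def segsOf : List Char → List (List Char)
  | [] => [[]]
  | c :: t => if c = '>' then [] :: segsOf t else (segsOf t).modifyHead (c :: ·)

-- the tag a completed segment yields, starting from scanner state (temp, rangle)
def gTag : List Char → Bool → List Char → List Char
  | temp, _, [] => temp
  | temp, rangle, c :: t =>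
    let rangle' := if c = '<' then true else rangle
    let temp' := if rangle' = true ∧ c ≠ '<' ∧ c ≠ '>' then temp ++ [c] else temp
    gTag temp' rangle' t

theorem segsOf_ne_nil (cs : List Char) : segsOf cs ≠ [] := by
  induction cs with
  | nil => simp [segsOf]
  | cons c t ih =>
    simp only [segsOf]
    split
    · simp
    · cases h : segsOf t with
      | nil => exact absurd h ih
      | cons s ss => simp [List.modifyHead]


theorem splitOn_go_nil (fuel : Nat) (cur : List Char) (acc : List (List Char)) :
    PySem.Chars.splitOn.go ['>'] fuel [] cur acc = acc.reverse ++ [cur.reverse] := by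
  rw [PySem.Chars.splitOn.go.eq_def]
  cases fuel <;> simp

theorem splitOn_go_cons (fuel : Nat) (c : Char) (t cur : List Char) (acc : List (List Char)) :
    PySem.Chars.splitOn.go ['>'] (fuel + 1) (c :: t) cur acc =
      if c = '>' then PySem.Chars.splitOn.go ['>'] fuel t [] (cur.reverse :: acc)
      else PySem.Chars.splitOn.go ['>'] fuel t (c :: cur) acc := by
  rw [PySem.Chars.splitOn.go.eq_def]
  by_cases h : c = '>'
  · subst h; simp [List.isPrefixOf]
  · simp [List.isPrefixOf, h, Ne.symm h]

theorem segsOf_cons_ex (cs : List Char) : ∃ s ss, segsOf cs = s :: ss := by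
  cases h : segsOf cs with
  | nil => exact absurd h (segsOf_ne_nil cs)
  | cons s ss => exact ⟨s, ss, rfl⟩

theorem splitOn_go_main (l : List Char) : ∀ (fuel : Nat) (cur : List Char) (acc : List (List Char)),
    l.length ≤ fuel →
    PySem.Chars.splitOn.go ['>'] fuel l cur acc =
      acc.reverse ++ (segsOf l).modifyHead (cur.reverse ++ ·) := by
  induction l with
  | nil => intro fuel cur acc _; rw [splitOn_go_nil]; simp [segsOf]
  | cons c t ih =>
    intro fuel cur acc hf
    cases fuel with
    | zero => simp at hf
    | succ f =>
      rw [splitOn_go_cons]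
      obtain ⟨s, ss, hs⟩ := segsOf_cons_ex t
      by_cases h : c = '>'
      · rw [if_pos h, ih f [] _ (by simpa using hf)]
        simp [segsOf, h, hs]
      · rw [if_neg h, ih f (c :: cur) acc (by simpa using hf)]
        simp [segsOf, h, hs]

theorem splitOn_eq_segsOf (cs : List Char) :
    PySem.Chars.splitOn cs ['>'] = segsOf cs := by
  rw [PySem.Chars.splitOn, splitOn_go_main cs (cs.length + 1) [] [] (by omega)]
  obtain ⟨s, ss, hs⟩ := segsOf_cons_ex cs
  simp [hs]

theorem find_go_eq (l : List Char) : ∀ (k : Nat),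
    PySem.Chars.find.go ['<'] l k =
      if '<' ∈ l then ((k : Int) + l.idxOf '<') else -1 := by
  induction l with
  | nil => intro k; rw [PySem.Chars.find.go.eq_def]; simp
  | cons c t ih =>
    intro k
    rw [PySem.Chars.find.go.eq_def]
    by_cases h : c = '<'
    · subst h; simp [List.isPrefixOf]
    · have hb : (List.isPrefixOf ['<'] (c :: t)) = false := by
        simp [List.isPrefixOf, Ne.symm h]
      simp only [hb, Bool.false_eq_true, if_false, ih (k + 1)]
      by_cases hm : '<' ∈ t
      · rw [if_pos hm, if_pos (by simp [hm])]
        rw [List.idxOf_cons_ne _ h]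
        push_cast; ring
      · rw [if_neg hm, if_neg (by simp [hm, Ne.symm h])]

theorem replace_go_main (l : List Char) : ∀ (fuel : Nat) (acc : List Char), l.length ≤ fuel →
    PySem.Chars.replace.go ['<'] [] fuel l acc = acc.reverse ++ l.filter (· ≠ '<') := by
  induction l with
  | nil =>
    intro fuel acc _
    rw [PySem.Chars.replace.go.eq_def]
    cases fuel <;> simp
  | cons c t ih =>
    intro fuel acc hf
    cases fuel with
    | zero => simp at hf
    | succ f =>
      by_cases h : c = '<'
      · subst h
        have e : PySem.Chars.replace.go ['<'] [] (f + 1) ('<' :: t) acc =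
            PySem.Chars.replace.go ['<'] [] f t acc := by
          rw [PySem.Chars.replace.go.eq_def]; simp [List.isPrefixOf]
        rw [e, ih f acc (by simpa using hf)]
        simp
      · have e : PySem.Chars.replace.go ['<'] [] (f + 1) (c :: t) acc =
            PySem.Chars.replace.go ['<'] [] f t (c :: acc) := by
          rw [PySem.Chars.replace.go.eq_def]; simp [List.isPrefixOf, Ne.symm h]
        rw [e, ih f (c :: acc) (by simpa using hf)]
        simp [h]

theorem replace_eq_filter (l : List Char) :
    PySem.Chars.replace l ['<'] [] = l.filter (· ≠ '<') := by
  rw [PySem.Chars.replace]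
  rw [if_neg (by simp)]
  rw [replace_go_main l l.length [] le_rfl]
  simp

theorem gTag_true (t : List Char) (hgt : '>' ∉ t) : ∀ temp : List Char,
    gTag temp true t = temp ++ t.filter (· ≠ '<') := by
  induction t with
  | nil => intro temp; simp [gTag]
  | cons c t ih =>
    intro temp
    simp only [List.mem_cons, not_or] at hgt
    have hc : c ≠ '>' := fun e => hgt.1 e.symm
    by_cases h : c = '<'
    · subst h; simp [gTag, ih hgt.2]
    · simp [gTag, h, hc, ih hgt.2]

theorem gTag_false (seg : List Char) (hgt : '>' ∉ seg) :
    gTag [] false seg =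
      if '<' ∈ seg then (seg.drop (seg.idxOf '<' + 1)).filter (· ≠ '<') else [] := by
  induction seg with
  | nil => simp [gTag]
  | cons c t ih =>
    simp only [List.mem_cons, not_or] at hgt
    have hc : c ≠ '>' := fun e => hgt.1 e.symm
    by_cases h : c = '<'
    · subst h
      simp [gTag, gTag_true t hgt.2]
    · have hstep : gTag [] false (c :: t) = gTag [] false t := by simp [gTag, h, hc]
      rw [hstep, ih hgt.2]
      by_cases hm : '<' ∈ t
      · rw [if_pos hm, if_pos (by simp [hm])]
        rw [List.idxOf_cons_ne _ h, List.drop_succ_cons]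
      · rw [if_neg hm, if_neg (by simp [hm, Ne.symm h])]

theorem tagOfB_eq_gTag (seg : List Char) (hgt : '>' ∉ seg) : tagOfB seg = gTag [] false seg := by
  have hfind : PySem.Chars.find seg ['<'] =
      if '<' ∈ seg then (seg.idxOf '<' : Int) else -1 := by
    rw [PySem.Chars.find, find_go_eq seg 0]; simp
  rw [tagOfB, gTag_false seg hgt]
  by_cases hm : '<' ∈ seg
  · rw [hfind, if_pos hm, if_pos hm, if_neg (by omega)]
    have hcast : ((seg.idxOf '<' : Int) + 1) = ((seg.idxOf '<' + 1 : Nat) : Int) := by push_cast; ring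
    rw [hcast, PySem.List.slice_from_natCast, replace_eq_filter]
  · rw [hfind, if_neg hm, if_neg hm, if_pos (by norm_num)]

theorem mem_segsOf_no_gt (cs : List Char) : ∀ s ∈ segsOf cs, '>' ∉ s := by
  induction cs with
  | nil => simp [segsOf]
  | cons c t ih =>
    intro s hs
    by_cases h : c = '>'
    · subst h
      rw [show segsOf ('>' :: t) = [] :: segsOf t by simp [segsOf]] at hs
      rcases List.mem_cons.mp hs with rfl | hs
      · simp
      · exact ih s hs
    · obtain ⟨s0, ss0, h0⟩ := segsOf_cons_ex t
      rw [show segsOf (c :: t) = (c :: s0) :: ss0 by simp [segsOf, h, h0]] at hs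
      rcases List.mem_cons.mp hs with rfl | hs
      · intro hmem
        rcases List.mem_cons.mp hmem with e | hmem2
        · exact h e.symm
        · exact ih s0 (by simp [h0]) hmem2
      · exact ih s (by simp [h0, hs])

theorem getTagAux_eq (cs : List Char) :
    ∀ (alist : List (List Char)) (temp : List Char) (rangle : Bool),
      getTagAux cs alist temp rangle =
        alist ++ (match segsOf cs with
          | [] => []
          | s :: ss => if ss = [] then [] else gTag temp rangle s :: ss.dropLast.map (gTag [] false)) := by
  induction cs with
  | nil => intro alist temp rangle; simp [getTagAux, segsOf]
  | cons c t ih =>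
    intro alist temp rangle
    obtain ⟨s0, ss0, h0⟩ := segsOf_cons_ex t
    by_cases h : c = '>'
    · subst h
      rw [show getTagAux ('>' :: t) alist temp rangle =
            getTagAux t (alist ++ [temp]) [] false by simp [getTagAux]]
      rw [ih (alist ++ [temp]) [] false]
      simp only [segsOf, h0]
      cases ss0 with
      | nil => simp [gTag]
      | cons a b => simp [gTag]
    · rw [show getTagAux (c :: t) alist temp rangle =
            getTagAux t alist
              (if (if c = '<' then true else rangle) = true ∧ c ≠ '<' ∧ c ≠ '>' then temp ++ [c] else temp)
              (if c = '<' then true else rangle) by simp [getTagAux, h]]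
      rw [ih]
      simp only [segsOf, if_neg h, h0, List.modifyHead]
      cases ss0 with
      | nil => simp
      | cons a b => simp [gTag]

theorem getTag_final (cs : List Char) :
    getTagAux cs [] [] false = (segsOf cs).dropLast.map (gTag [] false) := by
  rw [getTagAux_eq cs [] [] false]
  obtain ⟨s0, ss0, h0⟩ := segsOf_cons_ex cs
  simp only [h0, List.nil_append]
  cases ss0 with
  | nil => simp
  | cons a b => simp [List.dropLast]

theorem matchLoop_eq_foldl (ts : List (List Char)) (stk : List (List Char)) :
    matchLoop ts stk = ts.foldl stepB stk := by
  induction ts generalizing stk with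
  | nil => rfl
  | cons t rest ih =>
    by_cases h : stk = [] <;>
      simp [matchLoop, stepB, h, ih] <;> split <;> simp_all

-- ===== VERDICT (by name: the statement is the Claim_ definition above) =====
theorem HTMLMatch_spec : Claim_equal_HTMLMatch := by
  intro astring _
  unfold Spec_HTMLMatch HTMLMatch HTMLMatch_alt
  rw [getTag_final, matchLoop_eq_foldl, splitOn_eq_segsOf, PySem.List.slice_to_neg_one]
  have hmap : (segsOf astring.toList).dropLast.map (gTag [] false) =
      (segsOf astring.toList).dropLast.map tagOfB := by
    apply List.map_congr_left
    intro s hs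
    exact (tagOfB_eq_gTag s (mem_segsOf_no_gt astring.toList s (List.mem_of_mem_dropLast hs))).symm
  rw [hmap, List.foldl_map]
  simp
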